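-- pv_equiv track=rewrite | github.com/pypi-data/pypi-mirror-385 | packages/mpvis/mpvis-1.0.5-py3-none-any.whl/mpvis/mpdfg/utils/filters.py | try_to_reach
-- ===== SOURCE A (Python) =====
-- def try_to_reach(source, target, skip_path, paths, visited_already, sound_activities, followed_path):
--     followed_path.append(target)
--     if (source, target) == skip_path:
--         return False, followed_path
--     elif (source in sound_activities) or ((source, target) in paths):
--         return True, followed_path
--     else:
--         source_targets = [path[1] for path in paths if ((path[0] == source) and (path[1] not in visited_already))]
--         for source_target in source_targets:
--             visited_already.append(source_target)
--             reached, followed_path = try_to_reach(source_target, target, skip_path, paths, visited_already, sound_activities, followed_path)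
--             if reached:
--                 return True, followed_path
--
--     return False, followed_path
-- ===== SOURCE B (Python) =====
-- def try_to_reach(source, target, skip_path, paths, visited_already, sound_activities, followed_path):
--     # Iterative DFS with an explicit stack of pending-children frames; the edge
--     # list is indexed once into an adjacency dict, and edge / sound-activity /
--     # visited membership tests use hash sets.
--     adjacency = {}
--     for s, t in paths:
--         adjacency.setdefault(s, []).append(t)
--     edges = set(paths)
--     sound = set(sound_activities)
--     seen = set(visited_already)
--
--     def enter(node):
--         # one node visit: None = target reached, otherwise the snapshot of
--         # successors of `node` not yet visited at this moment
--         followed_path.append(target)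
--         if (node, target) == skip_path:
--             return []
--         if node in sound or (node, target) in edges:
--             return None
--         return [t for t in adjacency.get(node, []) if t not in seen]
--
--     outcome = enter(source)
--     if outcome is None:
--         return True, followed_path
--     stack = [outcome]
--     while stack:
--         frame = stack.pop()
--         if not frame:
--             continue
--         child, rest = frame[0], frame[1:]
--         stack.append(rest)
--         visited_already.append(child)
--         seen.add(child)
--         outcome = enter(child)
--         if outcome is None:
--             return True, followed_path
--         stack.append(outcome)
--     return False, followed_path
-- ===== Notes on version B (the rewrite author's own statement) =====
-- stated objective: alternative
-- what changed: The recursive DFS that rescans the whole edge list and the visited list at every node is replaced by an iterative explicit-stack DFS over an adjacency dict built once, with hash sets for the edge, sound-activity and visited membership tests.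
import Mathlib
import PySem

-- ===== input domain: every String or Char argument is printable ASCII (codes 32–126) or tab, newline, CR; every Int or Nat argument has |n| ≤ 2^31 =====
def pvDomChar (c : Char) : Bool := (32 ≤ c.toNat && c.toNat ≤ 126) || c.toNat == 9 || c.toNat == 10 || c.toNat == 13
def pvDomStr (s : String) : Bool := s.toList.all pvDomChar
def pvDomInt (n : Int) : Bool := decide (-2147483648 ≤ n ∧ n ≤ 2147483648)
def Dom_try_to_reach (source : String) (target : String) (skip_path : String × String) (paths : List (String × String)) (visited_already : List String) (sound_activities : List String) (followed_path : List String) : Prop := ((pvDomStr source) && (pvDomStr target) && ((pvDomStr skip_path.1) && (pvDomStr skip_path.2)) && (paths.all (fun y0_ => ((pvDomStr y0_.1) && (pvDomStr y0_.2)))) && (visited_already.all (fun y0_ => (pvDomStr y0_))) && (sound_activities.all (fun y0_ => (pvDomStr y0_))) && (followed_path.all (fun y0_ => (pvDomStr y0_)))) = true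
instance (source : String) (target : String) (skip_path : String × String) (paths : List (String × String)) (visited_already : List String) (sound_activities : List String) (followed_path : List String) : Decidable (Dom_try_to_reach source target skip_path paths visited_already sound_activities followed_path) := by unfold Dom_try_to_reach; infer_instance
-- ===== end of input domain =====

-- B replaces A's recursive DFS (which rescans the whole edge list and the visited list
-- at every node) by an iterative explicit-stack DFS over an adjacency dict built once,
-- with set membership for edges / sound activities / visited nodes.  Both versions of the
-- Python mutate visited_already and followed_path in place in the same way; the theorems
-- below are about the RETURN value.

-- ===== PORT A =====
-- A's for-loop over the snapshot of unvisited successors; `visit` is the recursive call.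
def loopA (visit : String → List String → List String → Bool × List String × List String) :
    List String → List String → List String → Bool × List String × List String
  | [], vis, fp => (false, vis, fp)
  | c :: cs, vis, fp =>
    let vis' := vis ++ [c]
    match visit c vis' fp with
    | (true, v, p) => (true, v, p)
    | (false, v, p) => loopA visit cs v p

-- A's recursion, made total by a depth-fuel guard (the `0` case is unreachable from the
-- initial fuel used below: the recursion depth of A is at most paths.length + 1).
def visitA (skip : String × String) (target : String) (paths : List (String × String))
    (sound : List String) : Nat → String → List String → List String → Bool × List String × List String
  | 0, _, vis, fp => (false, vis, fp)
  | f + 1, u, vis, fp =>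
    let fp' := fp ++ [target]
    if (u, target) = skip then (false, vis, fp')
    else if sound.contains u || paths.contains (u, target) then (true, vis, fp')
    else
      let snap := (paths.filter (fun p => p.1 == u && !(vis.contains p.2))).map Prod.snd
      loopA (visitA skip target paths sound f) snap vis fp'

def try_to_reach (source : String) (target : String) (skip_path : String × String) (paths : List (String × String)) (visited_already : List String) (sound_activities : List String) (followed_path : List String) : Bool × List String :=
  match visitA skip_path target paths sound_activities (paths.length + 2) source visited_already followed_path with
  | (r, _, fp) => (r, fp)

-- ===== PORT B =====
-- Source B's adjacency index: for s, t in paths: adjacency.setdefault(s, []).append(t)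
def buildAdj (paths : List (String × String)) : PySem.Dict String (List String) :=
  paths.foldl (fun d p => d.modify p.1 [] (fun l => l ++ [p.2])) PySem.Dict.empty

-- Source B's `enter` closure: none = target reached, some snap = successors still to explore.
def enterB (skip : String × String) (target : String) (adj : PySem.Dict String (List String))
    (edges : PySem.Set (String × String)) (sound : PySem.Set String)
    (node : String) (seen : PySem.Set String) (fp : List String) :
    Option (List String) × List String :=
  let fp' := fp ++ [target]
  if (node, target) = skip then (some [], fp')
  else if sound.contains node || edges.contains (node, target) then (none, fp')
  else (some ((adj.getD node []).filter (fun t => !(seen.contains t))), fp')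

-- helper for runB's termination measure
def adjWeight (adj : PySem.Dict String (List String)) : Nat :=
  (adj.values.map List.length).sum

-- used by runB's decreasing_by: any adjacency value is no longer than the total weight
theorem getD_length_le_adjWeight (adj : PySem.Dict String (List String)) (c : String) :
    (adj.getD c []).length ≤ adjWeight adj := by
  rw [PySem.Dict.getD_eq_get?_getD]
  cases hg : adj.get? c with
  | none => simp
  | some v =>
    have hv : v ∈ adj.values :=
      List.mem_map_of_mem (PySem.Dict.mem_items_of_get?_eq_some adj hg)
    have : v.length ∈ adj.values.map List.length := List.mem_map_of_mem hv
    simpa [adjWeight] using List.le_sum_of_mem this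

-- used by runB's decreasing_by: a snapshot returned by enterB is bounded by the weight
theorem enterB_some_length {skip : String × String} {target : String}
    {adj : PySem.Dict String (List String)} {edges : PySem.Set (String × String)}
    {sound : PySem.Set String} {node : String} {seen : PySem.Set String}
    {fp snap fp' : List String}
    (h : enterB skip target adj edges sound node seen fp = (some snap, fp')) :
    snap.length ≤ adjWeight adj := by
  unfold enterB at h
  split_ifs at h <;> simp_all
  · rw [← h.1]; exact le_trans (List.length_filter_le _ _) (getD_length_le_adjWeight adj node)

-- Source B's while loop over the explicit stack of pending-children frames.  Each frame
-- carries a depth budget as a fuel guard (the `0` branch is unreachable from the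
-- initial budget used below); Source B itself needs no budget.
def runB (skip : String × String) (target : String) (adj : PySem.Dict String (List String))
    (edges : PySem.Set (String × String)) (sound : PySem.Set String) :
    List (Nat × List String) → PySem.Set String → List String → Bool × List String
  | [], _, fp => (false, fp)
  | (_, []) :: rest, seen, fp => runB skip target adj edges sound rest seen fp
  | (b, c :: cs) :: rest, seen, fp =>
    let seen' := PySem.Set.add seen c
    match b with
    | 0 => runB skip target adj edges sound ((0, cs) :: rest) seen' fp
    | g + 1 =>
      match h : enterB skip target adj edges sound c seen' fp with
      | (none, fp') => (true, fp')
      | (some snap, fp') => runB skip target adj edges sound ((g, snap) :: (g + 1, cs) :: rest) seen' fp'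
  termination_by stack _ _ => (stack.map (fun f => (adjWeight adj + 2) ^ f.1 * (f.2.length + 1))).sum
  decreasing_by
  all_goals simp_wf
  have hs : snap.length ≤ adjWeight adj := enterB_some_length h
  have h1 : (adjWeight adj + 2) ^ g * (snap.length + 1) < (adjWeight adj + 2) ^ (g + 1) := by
    rw [pow_succ]
    have hp : 0 < (adjWeight adj + 2) ^ g := Nat.pow_pos (by omega)
    calc (adjWeight adj + 2) ^ g * (snap.length + 1)
        ≤ (adjWeight adj + 2) ^ g * (adjWeight adj + 1) := Nat.mul_le_mul_left _ (by omega)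
      _ < (adjWeight adj + 2) ^ g * (adjWeight adj + 2) := mul_lt_mul_of_pos_left (by omega) hp
  have h2 : (adjWeight adj + 2) ^ (g + 1) * (cs.length + 1 + 1)
      = (adjWeight adj + 2) ^ (g + 1) * (cs.length + 1) + (adjWeight adj + 2) ^ (g + 1) := by ring
  omega

def try_to_reach_alt (source : String) (target : String) (skip_path : String × String) (paths : List (String × String)) (visited_already : List String) (sound_activities : List String) (followed_path : List String) : Bool × List String :=
  let adj := buildAdj paths
  let edges := PySem.Set.ofList paths
  let soundS := PySem.Set.ofList sound_activities
  let seen := PySem.Set.ofList visited_already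
  match enterB skip_path target adj edges soundS source seen followed_path with
  | (none, fp') => (true, fp')
  | (some snap, fp') =>
    runB skip_path target adj edges soundS [(paths.length + 1, snap)] seen fp'

-- ===== PRECONDITION & SPEC =====
def Spec_try_to_reach (source : String) (target : String) (skip_path : String × String) (paths : List (String × String)) (visited_already : List String) (sound_activities : List String) (followed_path : List String) (out : Bool × List String) : Prop := out = try_to_reach_alt source target skip_path paths visited_already sound_activities followed_path
instance (source : String) (target : String) (skip_path : String × String) (paths : List (String × String)) (visited_already : List String) (sound_activities : List String) (followed_path : List String) (out : Bool × List String) : Decidable (Spec_try_to_reach source target skip_path paths visited_already sound_activities followed_path out) := by unfold Spec_try_to_reach; infer_instance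

-- ===== CLAIM (what is proved, stated in full; the proofs are below) =====
def Claim_equal_try_to_reach : Prop := ∀ (source : String) (target : String) (skip_path : String × String) (paths : List (String × String)) (visited_already : List String) (sound_activities : List String) (followed_path : List String), Dom_try_to_reach source target skip_path paths visited_already sound_activities followed_path → Spec_try_to_reach source target skip_path paths visited_already sound_activities followed_path (try_to_reach source target skip_path paths visited_already sound_activities followed_path)

-- ===== LEMMAS AND PROOFS =====
theorem setContains_ofList (l : List String) (x : String) : (PySem.Set.ofList l).contains x = l.contains x := by
  simp only [PySem.Set.contains_eq_listContains, List.contains_eq_mem]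
  simp [PySem.Set.mem_ofList]

theorem setContains_ofList_pair (l : List (String × String)) (x : String × String) : (PySem.Set.ofList l).contains x = l.contains x := by
  simp only [PySem.Set.contains_eq_listContains, List.contains_eq_mem]
  simp [PySem.Set.mem_ofList]

theorem inv_add (seen : PySem.Set String) (vis : List String) (c : String)
    (h : ∀ x, seen.contains x = vis.contains x) :
    ∀ x, (PySem.Set.add seen c).contains x = (vis ++ [c]).contains x := by
  intro x
  have := h x
  simp only [PySem.Set.contains_eq_listContains, List.contains_eq_mem] at *
  simp [PySem.Set.mem_add, this]

theorem snap_eq (paths : List (String × String)) (u : String) (seen : PySem.Set String) (vis : List String)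
    (h : ∀ x, seen.contains x = vis.contains x) :
    ((buildAdj paths).getD u []).filter (fun t => !(seen.contains t))
      = (paths.filter (fun p => p.1 == u && !(vis.contains p.2))).map Prod.snd := by
  have hf : (fun t => !(seen.contains t)) = (fun t => !(vis.contains t)) := by
    funext t; rw [h t]
  rw [hf]
  unfold buildAdj
  rw [PySem.Dict.getD_foldl_modify_append]
  simp only [PySem.Dict.getD_empty, List.nil_append]
  rw [List.filter_map]
  rw [List.filter_filter]
  refine congrArg _ (List.filter_congr ?_)
  intro a _
  simp [Bool.and_comm]

theorem runB_nil (skip : String × String) (target : String) (adj : PySem.Dict String (List String))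
    (edges : PySem.Set (String × String)) (sound : PySem.Set String)
    (seen : PySem.Set String) (fp : List String) :
    runB skip target adj edges sound [] seen fp = (false, fp) := by
  rw [runB]

theorem runB_empty_frame (skip : String × String) (target : String) (adj : PySem.Dict String (List String))
    (edges : PySem.Set (String × String)) (sound : PySem.Set String)
    (b : Nat) (rest : List (Nat × List String)) (seen : PySem.Set String) (fp : List String) :
    runB skip target adj edges sound ((b, []) :: rest) seen fp
      = runB skip target adj edges sound rest seen fp := by
  rw [runB]

theorem runB_zero (skip : String × String) (target : String) (adj : PySem.Dict String (List String))
    (edges : PySem.Set (String × String)) (sound : PySem.Set String)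
    (c : String) (cs : List String) (rest : List (Nat × List String))
    (seen : PySem.Set String) (fp : List String) :
    runB skip target adj edges sound ((0, c :: cs) :: rest) seen fp
      = runB skip target adj edges sound ((0, cs) :: rest) (PySem.Set.add seen c) fp := by
  rw [runB]

theorem runB_cons_none (skip : String × String) (target : String) (adj : PySem.Dict String (List String))
    (edges : PySem.Set (String × String)) (sound : PySem.Set String)
    (g : Nat) (c : String) (cs : List String) (rest : List (Nat × List String))
    (seen : PySem.Set String) (fp fp' : List String)
    (h : enterB skip target adj edges sound c (PySem.Set.add seen c) fp = (none, fp')) :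
    runB skip target adj edges sound ((g + 1, c :: cs) :: rest) seen fp = (true, fp') := by
  rw [runB]
  split <;> simp_all

theorem runB_cons_some (skip : String × String) (target : String) (adj : PySem.Dict String (List String))
    (edges : PySem.Set (String × String)) (sound : PySem.Set String)
    (g : Nat) (c : String) (cs snap : List String) (rest : List (Nat × List String))
    (seen : PySem.Set String) (fp fp' : List String)
    (h : enterB skip target adj edges sound c (PySem.Set.add seen c) fp = (some snap, fp')) :
    runB skip target adj edges sound ((g + 1, c :: cs) :: rest) seen fp
      = runB skip target adj edges sound ((g, snap) :: (g + 1, cs) :: rest) (PySem.Set.add seen c) fp' := by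
  rw [runB]
  split <;> simp_all


-- abbreviation-free helpers for the simulation proof
theorem visitA_succ_else (skip : String × String) (target : String) (paths : List (String × String))
    (sound : List String) (g : Nat) (c : String) (vis fp : List String)
    (hskip : ¬ (c, target) = skip)
    (hsnd : ¬ (sound.contains c || paths.contains (c, target)) = true) :
    visitA skip target paths sound (g + 1) c vis fp
      = loopA (visitA skip target paths sound g)
          ((paths.filter (fun p => p.1 == c && !(vis.contains p.2))).map Prod.snd) vis
          (fp ++ [target]) := by
  simp only [visitA]
  rw [if_neg hskip, if_neg hsnd]

theorem enterB_eval_skip (skip : String × String) (target : String)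
    (adj : PySem.Dict String (List String)) (edges : PySem.Set (String × String))
    (sound : PySem.Set String) (c : String) (seen : PySem.Set String) (fp : List String)
    (hskip : (c, target) = skip) :
    enterB skip target adj edges sound c seen fp = (some [], fp ++ [target]) := by
  unfold enterB
  rw [if_pos hskip]

theorem enterB_eval_found (skip : String × String) (target : String)
    (paths : List (String × String)) (sound : List String)
    (adj : PySem.Dict String (List String)) (c : String) (seen : PySem.Set String) (fp : List String)
    (hskip : ¬ (c, target) = skip)
    (hsnd : (sound.contains c || paths.contains (c, target)) = true) :
    enterB skip target adj (PySem.Set.ofList paths) (PySem.Set.ofList sound) c seen fp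
      = (none, fp ++ [target]) := by
  unfold enterB
  rw [if_neg hskip, setContains_ofList, setContains_ofList_pair, if_pos hsnd]

theorem enterB_eval_else (skip : String × String) (target : String)
    (paths : List (String × String)) (sound : List String)
    (c : String) (seen : PySem.Set String) (vis fp : List String)
    (hskip : ¬ (c, target) = skip)
    (hsnd : ¬ (sound.contains c || paths.contains (c, target)) = true)
    (hinv : ∀ x, seen.contains x = vis.contains x) :
    enterB skip target (buildAdj paths) (PySem.Set.ofList paths) (PySem.Set.ofList sound) c seen fp
      = (some ((paths.filter (fun p => p.1 == c && !(vis.contains p.2))).map Prod.snd),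
          fp ++ [target]) := by
  unfold enterB
  rw [if_neg hskip, setContains_ofList, setContains_ofList_pair, if_neg hsnd,
    snap_eq paths c seen vis hinv]

theorem runB_sim (skip : String × String) (target : String) (paths : List (String × String))
    (sound : List String) :
    ∀ (b : Nat) (cs vis : List String) (seen : PySem.Set String) (fp : List String),
      (∀ x, seen.contains x = vis.contains x) →
      ∃ seen' : PySem.Set String,
        (∀ x, seen'.contains x
            = (loopA (visitA skip target paths sound b) cs vis fp).2.1.contains x) ∧
        ∀ rest : List (Nat × List String),
          runB skip target (buildAdj paths) (PySem.Set.ofList paths) (PySem.Set.ofList sound)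
              ((b, cs) :: rest) seen fp
            = (if (loopA (visitA skip target paths sound b) cs vis fp).1
               then (true, (loopA (visitA skip target paths sound b) cs vis fp).2.2)
               else runB skip target (buildAdj paths) (PySem.Set.ofList paths)
                      (PySem.Set.ofList sound) rest seen'
                      (loopA (visitA skip target paths sound b) cs vis fp).2.2) := by
  intro b
  induction b with
  | zero =>
    intro cs
    induction cs with
    | nil =>
      intro vis seen fp hinv
      exact ⟨seen, by simpa [loopA] using hinv, fun rest => by
        rw [runB_empty_frame]; simp [loopA]⟩
    | cons c cs ih =>
      intro vis seen fp hinv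
      obtain ⟨seen', h1, h2⟩ := ih (vis ++ [c]) (PySem.Set.add seen c) fp (inv_add _ _ _ hinv)
      have hred : loopA (visitA skip target paths sound 0) (c :: cs) vis fp
          = loopA (visitA skip target paths sound 0) cs (vis ++ [c]) fp := by
        simp only [loopA, visitA]
      refine ⟨seen', ?_, fun rest => ?_⟩
      · rw [hred]; exact h1
      · rw [runB_zero, h2 rest, hred]
  | succ g ihb =>
    intro cs
    induction cs with
    | nil =>
      intro vis seen fp hinv
      exact ⟨seen, by simpa [loopA] using hinv, fun rest => by
        rw [runB_empty_frame]; simp [loopA]⟩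
    | cons c cs ih =>
      intro vis seen fp hinv
      have hinv1 := inv_add seen vis c hinv
      by_cases hskip : (c, target) = skip
      · -- skip edge: child returns False with one extra followed entry
        have hred : loopA (visitA skip target paths sound (g + 1)) (c :: cs) vis fp
            = loopA (visitA skip target paths sound (g + 1)) cs (vis ++ [c]) (fp ++ [target]) := by
          simp only [loopA, visitA]
          rw [if_pos hskip]
        obtain ⟨seen', h1, h2⟩ :=
          ih (vis ++ [c]) (PySem.Set.add seen c) (fp ++ [target]) hinv1
        refine ⟨seen', ?_, fun rest => ?_⟩
        · rw [hred]; exact h1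
        · rw [runB_cons_some _ _ _ _ _ _ _ _ _ _ _ _ _ (enterB_eval_skip _ _ _ _ _ _ _ _ hskip),
            runB_empty_frame, h2 rest, hred]
      · by_cases hsnd : (sound.contains c || paths.contains (c, target)) = true
        · -- the child reaches the target
          have hred : loopA (visitA skip target paths sound (g + 1)) (c :: cs) vis fp
              = (true, vis ++ [c], fp ++ [target]) := by
            simp only [loopA, visitA]
            rw [if_neg hskip, if_pos hsnd]
          refine ⟨PySem.Set.add seen c, ?_, fun rest => ?_⟩
          · rw [hred]; exact hinv1
          · rw [runB_cons_none _ _ _ _ _ _ _ _ _ _ _ _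
              (enterB_eval_found _ _ _ _ _ _ _ _ hskip hsnd), hred]
            simp
        · -- descend into the child
          rcases hL : loopA (visitA skip target paths sound g)
              ((paths.filter (fun p => p.1 == c && !((vis ++ [c]).contains p.2))).map Prod.snd)
              (vis ++ [c]) (fp ++ [target]) with ⟨r2, v2, p2⟩
          have hV : visitA skip target paths sound (g + 1) c (vis ++ [c]) fp = (r2, v2, p2) := by
            rw [visitA_succ_else _ _ _ _ _ _ _ _ hskip hsnd, hL]
          obtain ⟨seen2, h21, h22⟩ :=
            ihb ((paths.filter (fun p => p.1 == c && !((vis ++ [c]).contains p.2))).map Prod.snd)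
              (vis ++ [c]) (PySem.Set.add seen c) (fp ++ [target]) hinv1
          rw [hL] at h21 h22
          have hstep : ∀ rest, runB skip target (buildAdj paths) (PySem.Set.ofList paths)
              (PySem.Set.ofList sound) ((g + 1, c :: cs) :: rest) seen fp
              = runB skip target (buildAdj paths) (PySem.Set.ofList paths) (PySem.Set.ofList sound)
                  ((g, (paths.filter (fun p => p.1 == c && !((vis ++ [c]).contains p.2))).map Prod.snd)
                    :: (g + 1, cs) :: rest) (PySem.Set.add seen c) (fp ++ [target]) :=
            fun rest => runB_cons_some _ _ _ _ _ _ _ _ _ _ _ _ _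
              (enterB_eval_else _ _ _ _ _ _ _ _ hskip hsnd hinv1)
          cases r2 with
          | true =>
            have hred : loopA (visitA skip target paths sound (g + 1)) (c :: cs) vis fp
                = (true, v2, p2) := by
              simp only [loopA]
              rw [hV]
            refine ⟨seen2, ?_, fun rest => ?_⟩
            · rw [hred]; exact h21
            · rw [hstep rest, h22 ((g + 1, cs) :: rest), hred]
              simp
          | false =>
            have hred : loopA (visitA skip target paths sound (g + 1)) (c :: cs) vis fp
                = loopA (visitA skip target paths sound (g + 1)) cs v2 p2 := by
              simp only [loopA]
              rw [hV]
            obtain ⟨seen3, h31, h32⟩ := ih v2 seen2 p2 h21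
            refine ⟨seen3, ?_, fun rest => ?_⟩
            · rw [hred]; exact h31
            · rw [hstep rest, h22 ((g + 1, cs) :: rest), hred]
              simp only [Bool.false_eq_true, if_false]
              exact h32 rest


-- ===== VERDICT (by name: the statement is the Claim_ definition above) =====
theorem try_to_reach_spec : Claim_equal_try_to_reach := by
  unfold Claim_equal_try_to_reach Spec_try_to_reach
  intro src tgt skip paths vis sound fp _
  simp only [try_to_reach, try_to_reach_alt]
  have hinv0 : ∀ x, (PySem.Set.ofList vis).contains x = vis.contains x :=
    fun x => setContains_ofList vis x
  have e2 : paths.length + 2 = paths.length + 1 + 1 := rfl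
  by_cases hskip : (src, tgt) = skip
  · have hA : visitA skip tgt paths sound (paths.length + 2) src vis fp
        = (false, vis, fp ++ [tgt]) := by
      rw [e2]; simp only [visitA]; rw [if_pos hskip]
    rw [hA, enterB_eval_skip _ _ _ _ _ _ _ _ hskip]
    simp only []
    rw [runB_empty_frame, runB_nil]
  · by_cases hsnd : (sound.contains src || paths.contains (src, tgt)) = true
    · have hA : visitA skip tgt paths sound (paths.length + 2) src vis fp
          = (true, vis, fp ++ [tgt]) := by
        rw [e2]; simp only [visitA]; rw [if_neg hskip, if_pos hsnd]
      rw [hA, enterB_eval_found _ _ _ _ _ _ _ _ hskip hsnd]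
    · have hA : visitA skip tgt paths sound (paths.length + 2) src vis fp
          = loopA (visitA skip tgt paths sound (paths.length + 1))
              ((paths.filter (fun p => p.1 == src && !(vis.contains p.2))).map Prod.snd) vis
              (fp ++ [tgt]) := by
        rw [e2]; exact visitA_succ_else _ _ _ _ _ _ _ _ hskip hsnd
      rw [hA, enterB_eval_else _ _ _ _ _ _ _ _ hskip hsnd hinv0]
      simp only []
      rcases hL : loopA (visitA skip tgt paths sound (paths.length + 1))
          ((paths.filter (fun p => p.1 == src && !(vis.contains p.2))).map Prod.snd) vis
          (fp ++ [tgt]) with ⟨r, v, p⟩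
      obtain ⟨seen', h1, h2⟩ :=
        runB_sim skip tgt paths sound (paths.length + 1)
          ((paths.filter (fun p => p.1 == src && !(vis.contains p.2))).map Prod.snd)
          vis (PySem.Set.ofList vis) (fp ++ [tgt]) hinv0
      rw [hL] at h2
      rw [h2 []]
      cases r with
      | true => simp
      | false => simp only [Bool.false_eq_true, if_false, runB_nil]
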